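-- pv_equiv track=rewrite | github.com/hucebot/words2contact | scripts/llm_utils.py | covert_to_template_with_examples
-- ===== SOURCE A (Python) =====
-- def covert_to_template_with_examples(user_prompt: str, system_prompt: str, examples: dict, template: str) -> str:
--     if template == "ChatML":
--         # <|im_start|>system
--         # {system_message}<|im_end|>
--         # <|im_start|>user
--         # {prompt}<|im_end|>
--         # <|im_start|>assistant
--
--         prompt = ""
--
--         # let's start by adding the system prompt
--         prompt += f'<|im_start|>system\n{system_prompt}<|im_end|>\n'
--
--         # now we add every example
--         for ex in examples:
--             prompt += f'<|im_start|>user\n{ex["user"]}<|im_end|>\n<|im_start|>assistant\n{ex["assistant"]}<|im_end|>\n'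
--
--         # finally we add the user prompt
--         prompt += f'<|im_start|>user\n{user_prompt}<|im_end|>\n<|im_start|>assistant'
--         return prompt
--
--     elif template == "Orca-Vicuna":
--         # SYSTEM: {system_message}
--         # USER: {prompt}
--         # ASSISTANT:
--         prompt = ""
--         prompt += f'SYSTEM: {system_prompt}\n'
--         for ex in examples:
--             prompt += f'USER: {ex["user"]}\nASSISTANT: {ex["assistant"]}\n'
--         prompt += f'USER: {user_prompt}\nASSISTANT:'
--         return prompt
--
--     elif template == "Llama-3":
--         # <|begin_of_text|><|start_header_id|>system<|end_header_id|>
--         #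
--         # {system_prompt}<|eot_id|><|start_header_id|>user<|end_header_id|>
--         #
--         # {prompt}<|eot_id|><|start_header_id|>assistant<|end_header_id|>
--
--         prompt = ""
--         prompt += f'<|begin_of_text|><|start_header_id|>system<|end_header_id|>\n\n{system_prompt}<|eot_id|>'
--         for ex in examples:
--             prompt += f'<|start_header_id|>user<|end_header_id|>\n{ex["user"]}\n<|start_header_id|>assistant<|end_header_id|>\n{ex["assistant"]}\n'
--         prompt += f'<|start_header_id|>user<|end_header_id|>\n{user_prompt}<|eot_id|><|start_header_id|>assistant<|end_header_id|>'
--         return prompt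
--
--     elif template == "phi":
--         # f'<|system|>\n{system_prompt}<|end|>\n<|user|>\n{user_prompt}<|end|>\n<|assistant|>'
--         prompt = ""
--         prompt += f'<|system|>\n{system_prompt}<|end|>\n'
--         for ex in examples:
--             prompt += f'<|user|>\n{ex["user"]}<|end|>\n<|assistant|>\n{ex["assistant"]}<|end|>\n'
--         prompt += f'<|user|>\n{user_prompt}<|end|>\n<|assistant|>'
--         return prompt
--     else:
--         prompt = ""
--         prompt += f'{system_prompt}\n'
--         for ex in examples:
--             prompt += f'User: {ex["user"]}\nAssistant: {ex["assistant"]}\n'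
--         prompt += f'User: {user_prompt}'
--         return prompt
-- ===== SOURCE B (Python) =====
-- def _wrap(template, role, content):
--     """Render one (role, content) chat message; the role name itself is
--     interpolated into the template's markup."""
--     if template == "ChatML":
--         return f'<|im_start|>{role}\n{content}<|im_end|>\n'
--     if template == "Orca-Vicuna":
--         return f'{role.upper()}: {content}\n'
--     if template == "Llama-3":
--         if role == "system":
--             return f'<|begin_of_text|><|start_header_id|>system<|end_header_id|>\n\n{content}<|eot_id|>'
--         return f'<|start_header_id|>{role}<|end_header_id|>\n{content}\n'
--     if template == "phi":
--         return f'<|{role}|>\n{content}<|end|>\n'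
--     if role == "system":
--         return f'{content}\n'
--     return f'{role.capitalize()}: {content}\n'
--
--
-- def _final_user(template, user_prompt):
--     """The closing turn: the user's prompt plus the open assistant header."""
--     if template == "ChatML":
--         return f'<|im_start|>user\n{user_prompt}<|im_end|>\n<|im_start|>assistant'
--     if template == "Orca-Vicuna":
--         return f'USER: {user_prompt}\nASSISTANT:'
--     if template == "Llama-3":
--         return f'<|start_header_id|>user<|end_header_id|>\n{user_prompt}<|eot_id|><|start_header_id|>assistant<|end_header_id|>'
--     if template == "phi":
--         return f'<|user|>\n{user_prompt}<|end|>\n<|assistant|>'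
--     return f'User: {user_prompt}'
--
--
-- def covert_to_template_with_examples(user_prompt: str, system_prompt: str, examples: dict, template: str) -> str:
--     # Phase 1: flatten the conversation into a template-independent list of
--     # role-tagged messages.
--     msgs = [("system", system_prompt)]
--     for ex in examples:
--         msgs.append(("user", ex["user"]))
--         msgs.append(("assistant", ex["assistant"]))
--     # Phase 2: render each message with the role-generic wrapper, then close
--     # with the final user turn.
--     return ''.join(_wrap(template, role, content) for role, content in msgs) + _final_user(template, user_prompt)
-- ===== Notes on version B (the rewrite author's own statement) =====
-- stated objective: alternative
-- what changed: B first flattens the conversation into a template-independent list of role-tagged (role, content) messages, then renders each message with one role-generic wrapper that interpolates the role name itself into the markup (role.upper()/role.capitalize() for the Orca/default labels), closing with a final-user-turn helper; A instead has five parallel branch-specific accumulation loops over example pairs.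
import Mathlib
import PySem

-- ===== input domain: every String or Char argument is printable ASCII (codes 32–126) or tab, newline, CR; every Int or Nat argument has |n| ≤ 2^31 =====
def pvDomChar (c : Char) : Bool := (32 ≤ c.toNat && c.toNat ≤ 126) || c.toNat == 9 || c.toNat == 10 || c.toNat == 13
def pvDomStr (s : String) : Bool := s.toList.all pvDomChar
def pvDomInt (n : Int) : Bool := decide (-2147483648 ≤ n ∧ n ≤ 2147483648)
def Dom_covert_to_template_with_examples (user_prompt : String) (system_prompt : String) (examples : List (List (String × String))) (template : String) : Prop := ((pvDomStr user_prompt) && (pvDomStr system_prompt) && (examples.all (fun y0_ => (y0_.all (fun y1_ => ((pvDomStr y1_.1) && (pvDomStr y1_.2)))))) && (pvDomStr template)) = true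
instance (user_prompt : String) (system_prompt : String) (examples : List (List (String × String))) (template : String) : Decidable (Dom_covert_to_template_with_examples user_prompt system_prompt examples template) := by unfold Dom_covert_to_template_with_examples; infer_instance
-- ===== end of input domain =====

-- B flattens the conversation into a role-tagged message list and renders each message
-- with one role-generic wrapper (role name interpolated into the markup), instead of
-- A's five parallel branch-specific loops (objective: alternative decomposition).
-- Return-value equivalence only; neither version mutates its arguments.

-- `ex["user"]`: a Python dict is an association list; lookup = first match.
-- Pre_ below guarantees the key is present, so the default is never used inside Pre_.
def pvVal (ex : List (String × String)) (k : String) : String :=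
  (List.lookup k ex).getD ""

-- ===== PORT A =====
def covert_to_template_with_examples (user_prompt : String) (system_prompt : String) (examples : List (List (String × String))) (template : String) : String :=
  if template == "ChatML" then
    let prompt := "" ++ "<|im_start|>system\n" ++ system_prompt ++ "<|im_end|>\n"
    let prompt := examples.foldl (fun p ex =>
      p ++ "<|im_start|>user\n" ++ pvVal ex "user" ++ "<|im_end|>\n<|im_start|>assistant\n" ++ pvVal ex "assistant" ++ "<|im_end|>\n") prompt
    prompt ++ "<|im_start|>user\n" ++ user_prompt ++ "<|im_end|>\n<|im_start|>assistant"
  else if template == "Orca-Vicuna" then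
    let prompt := "" ++ "SYSTEM: " ++ system_prompt ++ "\n"
    let prompt := examples.foldl (fun p ex =>
      p ++ "USER: " ++ pvVal ex "user" ++ "\nASSISTANT: " ++ pvVal ex "assistant" ++ "\n") prompt
    prompt ++ "USER: " ++ user_prompt ++ "\nASSISTANT:"
  else if template == "Llama-3" then
    let prompt := "" ++ "<|begin_of_text|><|start_header_id|>system<|end_header_id|>\n\n" ++ system_prompt ++ "<|eot_id|>"
    let prompt := examples.foldl (fun p ex =>
      p ++ "<|start_header_id|>user<|end_header_id|>\n" ++ pvVal ex "user" ++ "\n<|start_header_id|>assistant<|end_header_id|>\n" ++ pvVal ex "assistant" ++ "\n") prompt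
    prompt ++ "<|start_header_id|>user<|end_header_id|>\n" ++ user_prompt ++ "<|eot_id|><|start_header_id|>assistant<|end_header_id|>"
  else if template == "phi" then
    let prompt := "" ++ "<|system|>\n" ++ system_prompt ++ "<|end|>\n"
    let prompt := examples.foldl (fun p ex =>
      p ++ "<|user|>\n" ++ pvVal ex "user" ++ "<|end|>\n<|assistant|>\n" ++ pvVal ex "assistant" ++ "<|end|>\n") prompt
    prompt ++ "<|user|>\n" ++ user_prompt ++ "<|end|>\n<|assistant|>"
  else
    let prompt := "" ++ system_prompt ++ "\n"
    let prompt := examples.foldl (fun p ex =>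
      p ++ "User: " ++ pvVal ex "user" ++ "\nAssistant: " ++ pvVal ex "assistant" ++ "\n") prompt
    prompt ++ "User: " ++ user_prompt

-- ===== PORT B =====
-- `role.capitalize()`: uppercase first char, lowercase the rest — exact on ASCII
def pvCapitalize (s : String) : String :=
  match s.toList with
  | [] => ""
  | c :: cs => String.ofList (c.toUpper :: cs.map Char.toLower)

-- one (role, content) chat message; the role name itself is interpolated into the markup
def pvWrap (template : String) (role : String) (content : String) : String :=
  if template == "ChatML" then
    "<|im_start|>" ++ role ++ "\n" ++ content ++ "<|im_end|>\n"
  else if template == "Orca-Vicuna" then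
    PySem.Str.upper role ++ ": " ++ content ++ "\n"
  else if template == "Llama-3" then
    if role == "system" then
      "<|begin_of_text|><|start_header_id|>system<|end_header_id|>\n\n" ++ content ++ "<|eot_id|>"
    else
      "<|start_header_id|>" ++ role ++ "<|end_header_id|>\n" ++ content ++ "\n"
  else if template == "phi" then
    "<|" ++ role ++ "|>\n" ++ content ++ "<|end|>\n"
  else if role == "system" then
    content ++ "\n"
  else
    pvCapitalize role ++ ": " ++ content ++ "\n"

-- the closing turn: the user's prompt plus the open assistant header
def pvFinalUser (template : String) (user_prompt : String) : String :=
  if template == "ChatML" then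
    "<|im_start|>user\n" ++ user_prompt ++ "<|im_end|>\n<|im_start|>assistant"
  else if template == "Orca-Vicuna" then
    "USER: " ++ user_prompt ++ "\nASSISTANT:"
  else if template == "Llama-3" then
    "<|start_header_id|>user<|end_header_id|>\n" ++ user_prompt ++ "<|eot_id|><|start_header_id|>assistant<|end_header_id|>"
  else if template == "phi" then
    "<|user|>\n" ++ user_prompt ++ "<|end|>\n<|assistant|>"
  else
    "User: " ++ user_prompt

def covert_to_template_with_examples_alt (user_prompt : String) (system_prompt : String) (examples : List (List (String × String))) (template : String) : String :=
  -- Phase 1: flatten into a template-independent role-tagged message list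
  let msgs := examples.foldl (fun m ex =>
    m ++ [("user", pvVal ex "user"), ("assistant", pvVal ex "assistant")])
    [("system", system_prompt)]
  -- Phase 2: render each message, then close with the final user turn
  String.join (msgs.map (fun rc => pvWrap template rc.1 rc.2)) ++ pvFinalUser template user_prompt

-- ===== PRECONDITION & SPEC =====
-- Pre_ excludes exactly the inputs where an example dict lacks the key "user" or
-- "assistant": there Python A (and B) raises KeyError.
def Pre_covert_to_template_with_examples (user_prompt : String) (system_prompt : String) (examples : List (List (String × String))) (template : String) : Prop :=
  (examples.all (fun ex => (List.lookup "user" ex).isSome && (List.lookup "assistant" ex).isSome)) = true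
instance (user_prompt : String) (system_prompt : String) (examples : List (List (String × String))) (template : String) : Decidable (Pre_covert_to_template_with_examples user_prompt system_prompt examples template) := by unfold Pre_covert_to_template_with_examples; infer_instance

def pvWitness_covert_to_template_with_examples : String × String × (List (List (String × String))) × String :=
  ("where?", "be brief", [[("user", "hi"), ("assistant", "hello")]], "ChatML")

def Spec_covert_to_template_with_examples (user_prompt : String) (system_prompt : String) (examples : List (List (String × String))) (template : String) (out : String) : Prop := out = covert_to_template_with_examples_alt user_prompt system_prompt examples template
instance (user_prompt : String) (system_prompt : String) (examples : List (List (String × String))) (template : String) (out : String) : Decidable (Spec_covert_to_template_with_examples user_prompt system_prompt examples template out) := by unfold Spec_covert_to_template_with_examples; infer_instance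

-- ===== CLAIM (what is proved, stated in full; the proofs are below) =====
def Claim_equal_covert_to_template_with_examples : Prop := ∀ (user_prompt : String) (system_prompt : String) (examples : List (List (String × String))) (template : String), Dom_covert_to_template_with_examples user_prompt system_prompt examples template → Pre_covert_to_template_with_examples user_prompt system_prompt examples template → Spec_covert_to_template_with_examples user_prompt system_prompt examples template (covert_to_template_with_examples user_prompt system_prompt examples template)

-- ===== LEMMAS AND PROOFS =====
theorem pv_foldl_shift (l : List String) (a : String) :
    l.foldl (fun r s => r ++ s) a = a ++ l.foldl (fun r s => r ++ s) "" := by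
  induction l generalizing a with
  | nil => simp
  | cons x xs ih =>
    simp only [List.foldl]
    rw [ih (a ++ x), ih ("" ++ x), String.append_assoc]
    simp only [String.empty_append]

theorem pv_join_cons (x : String) (l : List String) :
    String.join (x :: l) = x ++ String.join l := by
  simp only [String.join, List.foldl]
  rw [pv_foldl_shift]
  simp

theorem pv_foldl_join (f : List (String × String) → String) (l : List (List (String × String))) (pre : String) :
    l.foldl (fun p ex => p ++ f ex) pre = pre ++ String.join (l.map f) := by
  induction l generalizing pre with
  | nil => simp [String.join]
  | cons x xs ih =>
    simp only [List.foldl, List.map, ih, pv_join_cons, String.append_assoc]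

-- grouping the rendered flat message list back into per-example chunks
theorem pv_join_msgs (f : String × String → String) (sys : String) (l : List (List (String × String))) :
    String.join (List.map f (("system", sys) :: l.flatMap (fun ex => [("user", pvVal ex "user"), ("assistant", pvVal ex "assistant")])))
      = f ("system", sys) ++ String.join (l.map (fun ex => f ("user", pvVal ex "user") ++ f ("assistant", pvVal ex "assistant"))) := by
  rw [List.map_cons, pv_join_cons]
  congr 1
  induction l with
  | nil => rfl
  | cons x xs ih =>
    simp only [List.flatMap_cons, List.map_cons, List.cons_append,
      List.nil_append, pv_join_cons, ih, String.append_assoc]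

-- merging two adjacent literal segments inside a right-associated chain
theorem pv_lit (a b c y : String) (h : a ++ b = c) : a ++ (b ++ y) = c ++ y := by
  rw [← String.append_assoc, h]

-- ===== VERDICT (by name: the statement is the Claim_ definition above) =====
theorem covert_to_template_with_examples_spec : Claim_equal_covert_to_template_with_examples := by
  intro user_prompt system_prompt examples template _ _
  unfold Spec_covert_to_template_with_examples covert_to_template_with_examples covert_to_template_with_examples_alt
  simp only [PySem.List.foldl_append_eq_flatMap, List.singleton_append]
  rw [pv_join_msgs]
  by_cases h1 : template = "ChatML"
  · subst h1
    simp [pvWrap, pvFinalUser, pv_foldl_join, String.append_assoc]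
    refine congrArg String.join (List.map_congr_left fun ex _ => ?_)
    rw [pv_lit "<|im_end|>\n" "<|im_start|>assistant\n" "<|im_end|>\n<|im_start|>assistant\n" _ (by decide)]
  · by_cases h2 : template = "Orca-Vicuna"
    · subst h2
      have hS : PySem.Str.upper "system" = "SYSTEM" := by decide
      have hU : PySem.Str.upper "user" = "USER" := by decide
      have hA : PySem.Str.upper "assistant" = "ASSISTANT" := by decide
      simp [pvWrap, pvFinalUser, hS, hU, hA, pv_foldl_join, String.append_assoc]
      refine congrArg String.join (List.map_congr_left fun ex _ => ?_)
      rw [pv_lit "\n" "ASSISTANT: " "\nASSISTANT: " _ (by decide)]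
    · by_cases h3 : template = "Llama-3"
      · subst h3
        simp [pvWrap, pvFinalUser, pv_foldl_join, String.append_assoc]
        refine congrArg String.join (List.map_congr_left fun ex _ => ?_)
        rw [pv_lit "\n" "<|start_header_id|>assistant<|end_header_id|>\n" "\n<|start_header_id|>assistant<|end_header_id|>\n" _ (by decide)]
      · by_cases h4 : template = "phi"
        · subst h4
          simp [pvWrap, pvFinalUser, pv_foldl_join, String.append_assoc]
          refine congrArg String.join (List.map_congr_left fun ex _ => ?_)
          rw [pv_lit "<|end|>\n" "<|assistant|>\n" "<|end|>\n<|assistant|>\n" _ (by decide)]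
        · have b1 : (template == "ChatML") = false := by simp [h1]
          have b2 : (template == "Orca-Vicuna") = false := by simp [h2]
          have b3 : (template == "Llama-3") = false := by simp [h3]
          have b4 : (template == "phi") = false := by simp [h4]
          have hu : pvCapitalize "user" = "User" := by decide
          have ha : pvCapitalize "assistant" = "Assistant" := by decide
          simp [pvWrap, pvFinalUser, b1, b2, b3, b4, hu, ha, pv_foldl_join, String.append_assoc]
          refine congrArg String.join (List.map_congr_left fun ex _ => ?_)
          rw [pv_lit "\n" "Assistant: " "\nAssistant: " _ (by decide)]
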